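-- pv_equiv track=rewrite | github.com/DiegoPerdomo0805/labA_lenguajes | InfixToPostfix.py | symbol_check
-- ===== SOURCE A (Python) =====
-- def symbol_check(exp):
--     flag = True
--
--     #symbols = ['*', '|', '(', ')']
--     for i in range(len(exp)):
--         e = exp[i]
--         if e == '*':
--             if i == 0 or exp[i-1] == '|' or exp[i-1] == '(':
--                 flag = False
--         elif e == '|':
--             if i == 0 or exp[i-1] == '|' or exp[i-1] == '(' or i == len(exp)-1:
--                 flag = False
--             else:
--                 if exp[i+1] == '|' or exp[i+1] == ')' or exp[i+1] == '*' or exp[i+1] == '.' or exp[i+1] == '+' or exp[i+1] == '?':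
--                     flag = False
--         elif e == '.':
--             if i == 0 or exp[i-1] == '|' or exp[i-1] == '(' or i == len(exp)-1:
--                 flag = False
--             else:
--                 if exp[i+1] == '|' or exp[i+1] == ')' or exp[i+1] == '*' or exp[i+1] == '.' or exp[i+1] == '+' or exp[i+1] == '?':
--                     flag = False
--         elif e == '(':
--             if i == len(exp)-1:
--                 flag = False
--             else:
--                 if exp[i+1] == '|' or exp[i+1] == ')' or exp[i+1] == '*' or exp[i+1] == '.' or exp[i+1] == '+' or exp[i+1] == '?':
--                     flag = False
--         elif e == '+':
--             if i == 0 or exp[i-1] == '|' or exp[i-1] == '(':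
--                 flag = False
--         elif e == '?':
--             if i == 0 or exp[i-1] == '|' or exp[i-1] == '(':
--                 flag = False
--
--
--     return flag
-- ===== SOURCE B (Python) =====
-- def symbol_check(exp):
--     if not exp:
--         return True
--     if exp[0] in '*+?|.' or exp[-1] in '|.(':
--         return False
--     return not any(l + r in exp for l in '|.(' for r in '|)*.+?')
-- ===== Notes on version B (the rewrite author's own statement) =====
-- stated objective: faster
-- what changed: Replaces A's per-character index-peeking branch cascade by two boundary-character tests plus a loop over the 18 forbidden bigrams, each checked with one built-in substring search; B never iterates over the input's characters in Python code.
import Mathlib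
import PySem

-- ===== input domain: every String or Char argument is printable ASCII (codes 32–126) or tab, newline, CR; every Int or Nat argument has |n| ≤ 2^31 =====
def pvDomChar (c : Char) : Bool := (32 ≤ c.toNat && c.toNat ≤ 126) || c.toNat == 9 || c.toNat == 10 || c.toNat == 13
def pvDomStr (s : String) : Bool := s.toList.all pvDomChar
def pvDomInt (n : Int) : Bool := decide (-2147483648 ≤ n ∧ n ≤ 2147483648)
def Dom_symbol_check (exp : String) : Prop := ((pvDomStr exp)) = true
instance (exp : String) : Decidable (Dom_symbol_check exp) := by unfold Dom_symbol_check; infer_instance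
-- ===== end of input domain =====

-- B replaces A's per-character index-peeking branch cascade by two boundary tests plus one
-- substring search per forbidden bigram (objective: faster, measured; no Python-level input loop).

-- ===== PORT A =====
-- pvStepA is the literal body of A's `for i in range(len(exp))` loop acting on the flag.
-- Every exp[..] access Python performs is in range (exp[i-1] is only read when i ≠ 0 via
-- `or` short-circuit, exp[i+1] only when i ≠ len-1), so List.getD with a dummy default is exact.
def pvStepA (l : List Char) (n : Nat) (flag : Bool) (i : Nat) : Bool :=
  let e := l.getD i ' '
  if e = '*' then
    (if i = 0 ∨ l.getD (i-1) ' ' = '|' ∨ l.getD (i-1) ' ' = '(' then false else flag)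
  else if e = '|' then
    (if i = 0 ∨ l.getD (i-1) ' ' = '|' ∨ l.getD (i-1) ' ' = '(' ∨ i = n - 1 then false
     else if l.getD (i+1) ' ' = '|' ∨ l.getD (i+1) ' ' = ')' ∨ l.getD (i+1) ' ' = '*' ∨
             l.getD (i+1) ' ' = '.' ∨ l.getD (i+1) ' ' = '+' ∨ l.getD (i+1) ' ' = '?' then false
     else flag)
  else if e = '.' then
    (if i = 0 ∨ l.getD (i-1) ' ' = '|' ∨ l.getD (i-1) ' ' = '(' ∨ i = n - 1 then false
     else if l.getD (i+1) ' ' = '|' ∨ l.getD (i+1) ' ' = ')' ∨ l.getD (i+1) ' ' = '*' ∨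
             l.getD (i+1) ' ' = '.' ∨ l.getD (i+1) ' ' = '+' ∨ l.getD (i+1) ' ' = '?' then false
     else flag)
  else if e = '(' then
    (if i = n - 1 then false
     else if l.getD (i+1) ' ' = '|' ∨ l.getD (i+1) ' ' = ')' ∨ l.getD (i+1) ' ' = '*' ∨
             l.getD (i+1) ' ' = '.' ∨ l.getD (i+1) ' ' = '+' ∨ l.getD (i+1) ' ' = '?' then false
     else flag)
  else if e = '+' then
    (if i = 0 ∨ l.getD (i-1) ' ' = '|' ∨ l.getD (i-1) ' ' = '(' then false else flag)
  else if e = '?' then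
    (if i = 0 ∨ l.getD (i-1) ' ' = '|' ∨ l.getD (i-1) ' ' = '(' then false else flag)
  else flag

def symbol_check (exp : String) : Bool :=
  let l := exp.toList
  (List.range l.length).foldl (pvStepA l l.length) true

-- ===== PORT B =====
-- Source B: empty → True; boundary chars checked against '*+?|.' and '|.('; then
-- `not any(l + r in exp for l in '|.(' for r in '|)*.+?')` — one substring search per bigram.
def symbol_check_alt (exp : String) : Bool :=
  if exp.toList.isEmpty then true
  else if "*+?|.".toList.contains (exp.toList.headD ' ')
       || "|.(".toList.contains (exp.toList.getLastD ' ') then false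
  else ! ("|.(".toList.any fun l => "|)*.+?".toList.any fun r =>
            PySem.Str.isIn (String.ofList [l, r]) exp)

-- ===== PRECONDITION & SPEC =====
def Spec_symbol_check (exp : String) (out : Bool) : Prop := out = symbol_check_alt exp
instance (exp : String) (out : Bool) : Decidable (Spec_symbol_check exp out) := by unfold Spec_symbol_check; infer_instance

-- ===== CLAIM (what is proved, stated in full; the proofs are below) =====
def Claim_equal_symbol_check : Prop := ∀ (exp : String), Dom_symbol_check exp → Spec_symbol_check exp (symbol_check exp)

-- ===== LEMMAS AND PROOFS =====

-- the per-index "this position violates a constraint" predicate that A's loop accumulates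
def pvBadA (l : List Char) (i : Nat) : Bool :=
  let e := l.getD i ' '
  let pb : Prop := i = 0 ∨ l.getD (i-1) ' ' = '|' ∨ l.getD (i-1) ' ' = '('
  let nb : Prop := l.getD (i+1) ' ' = '|' ∨ l.getD (i+1) ' ' = ')' ∨ l.getD (i+1) ' ' = '*' ∨
    l.getD (i+1) ' ' = '.' ∨ l.getD (i+1) ' ' = '+' ∨ l.getD (i+1) ' ' = '?'
  if e = '*' then decide pb
  else if e = '|' then
    (decide (i = 0 ∨ l.getD (i-1) ' ' = '|' ∨ l.getD (i-1) ' ' = '(' ∨ i = l.length - 1) || decide nb)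
  else if e = '.' then
    (decide (i = 0 ∨ l.getD (i-1) ' ' = '|' ∨ l.getD (i-1) ' ' = '(' ∨ i = l.length - 1) || decide nb)
  else if e = '(' then (decide (i = l.length - 1) || decide nb)
  else if e = '+' then decide pb
  else if e = '?' then decide pb
  else false

def pvStartBad (c : Char) : Bool := "*+?|.".toList.contains c
def pvEndBad (c : Char) : Bool := "|.(".toList.contains c
def pvPairBad (a b : Char) : Bool := "|.(".toList.contains a && "|)*.+?".toList.contains b

set_option maxHeartbeats 1000000 in
theorem pv_step_eq (l : List Char) (flag : Bool) (i : Nat) :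
    pvStepA l l.length flag i = (flag && ! pvBadA l i) := by
  unfold pvStepA pvBadA
  cases flag <;> split_ifs <;> simp_all

theorem pv_foldl_step {α : Type} (step : Bool → α → Bool) (g : α → Bool)
    (h : ∀ f i, step f i = (f && ! g i)) :
    ∀ (xs : List α) (b : Bool), xs.foldl step b = (b && xs.all (fun i => ! g i)) := by
  intro xs
  induction xs with
  | nil => intro b; simp
  | cons x xs ih => intro b; simp [List.foldl_cons, h, ih, Bool.and_assoc]

theorem pv_A_all (exp : String) :
    symbol_check exp = (List.range exp.toList.length).all (fun i => ! pvBadA exp.toList i) := by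
  unfold symbol_check
  rw [pv_foldl_step (pvStepA exp.toList exp.toList.length) (pvBadA exp.toList)
        (pv_step_eq exp.toList)]
  simp

theorem pv_startBad_of (c : Char)
    (h : c = '*' ∨ c = '+' ∨ c = '?' ∨ c = '|' ∨ c = '.') : pvStartBad c = true := by
  rcases h with h|h|h|h|h <;> subst h <;> decide

theorem pv_endBad_of (c : Char)
    (h : c = '|' ∨ c = '.' ∨ c = '(') : pvEndBad c = true := by
  rcases h with h|h|h <;> subst h <;> decide

theorem pv_pairBad_of (a b : Char)
    (hl : a = '|' ∨ a = '.' ∨ a = '(')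
    (hr : b = '|' ∨ b = ')' ∨ b = '*' ∨ b = '.' ∨ b = '+' ∨ b = '?') :
    pvPairBad a b = true := by
  rcases hl with h|h|h <;> subst h <;> rcases hr with h|h|h|h|h|h <;> subst h <;> decide

theorem pv_main_fwd (l : List Char) (i : Nat) (hi : i < l.length)
    (hbad : pvBadA l i = true) :
    pvStartBad (l.getD 0 ' ') = true ∨ pvEndBad (l.getD (l.length - 1) ' ') = true ∨
      ∃ j, j + 1 < l.length ∧ pvPairBad (l.getD j ' ') (l.getD (j+1) ' ') = true := by
  simp only [pvBadA] at hbad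
  split_ifs at hbad with h1 h2 h3 h4 h5 h6 <;>
    simp only [Bool.or_eq_true, decide_eq_true_eq] at hbad
  · -- e = '*'
    by_cases h0 : i = 0
    · left; subst h0; exact pv_startBad_of _ (by tauto)
    · right; right
      refine ⟨i - 1, by omega, ?_⟩
      have hstep : i - 1 + 1 = i := by omega
      rw [hstep]
      exact pv_pairBad_of _ _ (by tauto) (by tauto)
  · -- e = '|'
    by_cases h0 : i = 0
    · left; subst h0; exact pv_startBad_of _ (by tauto)
    by_cases hL : i = l.length - 1
    · right; left; rw [← hL]; exact pv_endBad_of _ (by tauto)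
    rcases hbad with (h0' | hp | hp | hL') | hn
    · exact absurd h0' h0
    · right; right
      refine ⟨i - 1, by omega, ?_⟩
      have hstep : i - 1 + 1 = i := by omega
      rw [hstep]
      exact pv_pairBad_of _ _ (by tauto) (by tauto)
    · right; right
      refine ⟨i - 1, by omega, ?_⟩
      have hstep : i - 1 + 1 = i := by omega
      rw [hstep]
      exact pv_pairBad_of _ _ (by tauto) (by tauto)
    · exact absurd hL' hL
    · right; right
      refine ⟨i, by omega, ?_⟩
      exact pv_pairBad_of _ _ (by tauto) (by tauto)
  · -- e = '.'
    by_cases h0 : i = 0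
    · left; subst h0; exact pv_startBad_of _ (by tauto)
    by_cases hL : i = l.length - 1
    · right; left; rw [← hL]; exact pv_endBad_of _ (by tauto)
    rcases hbad with (h0' | hp | hp | hL') | hn
    · exact absurd h0' h0
    · right; right
      refine ⟨i - 1, by omega, ?_⟩
      have hstep : i - 1 + 1 = i := by omega
      rw [hstep]
      exact pv_pairBad_of _ _ (by tauto) (by tauto)
    · right; right
      refine ⟨i - 1, by omega, ?_⟩
      have hstep : i - 1 + 1 = i := by omega
      rw [hstep]
      exact pv_pairBad_of _ _ (by tauto) (by tauto)
    · exact absurd hL' hL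
    · right; right
      refine ⟨i, by omega, ?_⟩
      exact pv_pairBad_of _ _ (by tauto) (by tauto)
  · -- e = '('
    by_cases hL : i = l.length - 1
    · right; left; rw [← hL]; exact pv_endBad_of _ (by tauto)
    rcases hbad with hL' | hn
    · exact absurd hL' hL
    · right; right
      refine ⟨i, by omega, ?_⟩
      exact pv_pairBad_of _ _ (by tauto) (by tauto)
  · -- e = '+'
    by_cases h0 : i = 0
    · left; subst h0; exact pv_startBad_of _ (by tauto)
    · right; right
      refine ⟨i - 1, by omega, ?_⟩
      have hstep : i - 1 + 1 = i := by omega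
      rw [hstep]
      exact pv_pairBad_of _ _ (by tauto) (by tauto)
  · -- e = '?'
    by_cases h0 : i = 0
    · left; subst h0; exact pv_startBad_of _ (by tauto)
    · right; right
      refine ⟨i - 1, by omega, ?_⟩
      have hstep : i - 1 + 1 = i := by omega
      rw [hstep]
      exact pv_pairBad_of _ _ (by tauto) (by tauto)

theorem pv_main_bwd (l : List Char) (hn0 : 0 < l.length)
    (h : pvStartBad (l.getD 0 ' ') = true ∨ pvEndBad (l.getD (l.length - 1) ' ') = true ∨
      ∃ j, j + 1 < l.length ∧ pvPairBad (l.getD j ' ') (l.getD (j+1) ' ') = true) :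
    ∃ i, i < l.length ∧ pvBadA l i = true := by
  rcases h with hs | he | ⟨j, hj, hp⟩
  · refine ⟨0, hn0, ?_⟩
    have hc : l.getD 0 ' ' = '*' ∨ l.getD 0 ' ' = '+' ∨ l.getD 0 ' ' = '?' ∨
        l.getD 0 ' ' = '|' ∨ l.getD 0 ' ' = '.' := by
      simp [pvStartBad] at hs; tauto
    rcases hc with h|h|h|h|h <;> simp [pvBadA, List.getD_eq_getElem?_getD] at h ⊢ <;> simp [h]
  · refine ⟨l.length - 1, by omega, ?_⟩
    have hc : l.getD (l.length - 1) ' ' = '|' ∨ l.getD (l.length - 1) ' ' = '.' ∨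
        l.getD (l.length - 1) ' ' = '(' := by
      simp [pvEndBad] at he; tauto
    rcases hc with h|h|h <;> simp [pvBadA, List.getD_eq_getElem?_getD] at h ⊢ <;> simp [h]
  · have hp' : (l.getD j ' ' = '|' ∨ l.getD j ' ' = '.' ∨ l.getD j ' ' = '(') ∧
        (l.getD (j+1) ' ' = '|' ∨ l.getD (j+1) ' ' = ')' ∨ l.getD (j+1) ' ' = '*' ∨
         l.getD (j+1) ' ' = '.' ∨ l.getD (j+1) ' ' = '+' ∨ l.getD (j+1) ' ' = '?') := by
      simp [pvPairBad] at hp; tauto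
    obtain ⟨hl, hr⟩ := hp'
    refine ⟨j, by omega, ?_⟩
    rcases hl with h|h|h <;> rcases hr with h'|h'|h'|h'|h'|h' <;>
      simp [pvBadA, List.getD_eq_getElem?_getD] at h h' ⊢ <;> simp [h, h']

-- a two-character substring occurs iff some adjacent index pair carries those characters
theorem pv_infix_pair (a b : Char) (s : List Char) :
    ([a, b] <:+: s) ↔ ∃ i, i + 1 < s.length ∧ s.getD i ' ' = a ∧ s.getD (i+1) ' ' = b := by
  constructor
  · rintro ⟨t, u, h⟩
    refine ⟨t.length, ?_, ?_, ?_⟩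
    · have := congrArg List.length h
      simp at this; omega
    · have hlen : t.length + 1 < s.length := by
        have := congrArg List.length h; simp at this; omega
      rw [← h]
      simp [List.getD_eq_getElem?_getD]
    · rw [← h]
      simp [List.getD_eq_getElem?_getD]
  · rintro ⟨i, hi, ha, hb⟩
    refine ⟨s.take i, s.drop (i+2), ?_⟩
    have ha' : s[i]'(by omega) = a := by
      rw [← ha]; exact (List.getD_eq_getElem s ' ' (by omega)).symm
    have hb' : s[i+1]'(by omega) = b := by
      rw [← hb]; exact (List.getD_eq_getElem s ' ' (by omega)).symm
    have h1 : s.drop i = s[i]'(by omega) :: s.drop (i+1) :=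
      (List.getElem_cons_drop (by omega)).symm
    have h2 : s.drop (i+1) = s[i+1]'(by omega) :: s.drop (i+2) :=
      (List.getElem_cons_drop (by omega)).symm
    calc s.take i ++ [a, b] ++ s.drop (i+2)
        = s.take i ++ (a :: b :: s.drop (i+2)) := by simp
      _ = s.take i ++ s.drop i := by rw [h1, h2, ha', hb']
      _ = s := List.take_append_drop i s

theorem pv_alt_char (exp : String) :
    (symbol_check_alt exp = true) ↔
      (exp.toList = [] ∨ (¬ pvStartBad (exp.toList.getD 0 ' ') = true ∧
        ¬ pvEndBad (exp.toList.getD (exp.toList.length - 1) ' ') = true ∧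
        ∀ i, i + 1 < exp.toList.length →
          ¬ pvPairBad (exp.toList.getD i ' ') (exp.toList.getD (i+1) ' ') = true)) := by
  unfold symbol_check_alt
  by_cases hnil : exp.toList = []
  · simp [hnil]
  · have hn0 : 0 < exp.toList.length := List.length_pos_iff.mpr hnil
    rw [if_neg (by simpa [List.isEmpty_iff] using hnil)]
    have hhead : exp.toList.headD ' ' = exp.toList.getD 0 ' ' := by
      cases h : exp.toList with
      | nil => exact absurd h hnil
      | cons c r => simp
    have hlast : exp.toList.getLastD ' ' = exp.toList.getD (exp.toList.length - 1) ' ' := by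
      cases h : exp.toList with
      | nil => exact absurd h hnil
      | cons c r =>
        rw [List.getLastD_eq_getLast?, List.getLast?_eq_getElem?]
        rw [List.getD_eq_getElem?_getD]
    rw [hhead, hlast]
    by_cases hS : pvStartBad (exp.toList.getD 0 ' ') = true
    · rw [if_pos (by simp only [Bool.or_eq_true]; left; exact hS)]
      apply iff_of_false (by simp)
      rintro (h | ⟨h1, _, _⟩)
      · exact hnil h
      · exact h1 hS
    · by_cases hE : pvEndBad (exp.toList.getD (exp.toList.length - 1) ' ') = true
      · rw [if_pos (by simp only [Bool.or_eq_true]; right; exact hE)]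
        apply iff_of_false (by simp)
        rintro (h | ⟨_, h2, _⟩)
        · exact hnil h
        · exact h2 hE
      · rw [if_neg (by
          simp only [Bool.or_eq_true, not_or, Bool.not_eq_true] at hS hE ⊢
          unfold pvStartBad at hS; unfold pvEndBad at hE; exact ⟨hS, hE⟩)]
        simp only [hnil, false_or]
        constructor
        · intro h
          refine ⟨hS, hE, fun i hi hp => ?_⟩
          simp only [Bool.not_eq_eq_eq_not, Bool.not_true, List.any_eq_false,
            Bool.not_eq_true] at h
          have hpair := hp
          simp only [pvPairBad, Bool.and_eq_true, List.contains_eq_mem, decide_eq_true_eq] at hpair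
          obtain ⟨hl, hr⟩ := hpair
          have := h _ hl _ hr
          rw [PySem.Str.isIn_eq] at this
          have hin : PySem.Chars.isIn [exp.toList.getD i ' ', exp.toList.getD (i+1) ' ']
              exp.toList = true := by
            rw [PySem.Chars.isIn_iff_infix, pv_infix_pair]
            exact ⟨i, hi, rfl, rfl⟩
          rw [String.toList_ofList] at this
          rw [this] at hin; exact absurd hin (by simp)
        · rintro ⟨_, _, h3⟩
          simp only [Bool.not_eq_eq_eq_not, Bool.not_true, List.any_eq_false, Bool.not_eq_true]
          intro l hl r hr
          rw [PySem.Str.isIn_eq]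
          by_contra hcon
          have htrue : PySem.Chars.isIn (String.ofList [l, r]).toList exp.toList = true := by
            cases h : PySem.Chars.isIn (String.ofList [l, r]).toList exp.toList
            · exact absurd h hcon
            · rfl
          rw [String.toList_ofList, PySem.Chars.isIn_iff_infix, pv_infix_pair] at htrue
          obtain ⟨i, hi, ha, hb⟩ := htrue
          have hpb : pvPairBad (exp.toList.getD i ' ') (exp.toList.getD (i+1) ' ') = true := by
            rw [ha, hb]
            exact pv_pairBad_of l r (by simpa [List.contains_eq_mem] using hl)
              (by simpa [List.contains_eq_mem] using hr)
          exact h3 i hi hpb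

-- ===== VERDICT (by name: the statement is the Claim_ definition above) =====
theorem symbol_check_spec : Claim_equal_symbol_check := by
  intro exp _
  unfold Spec_symbol_check
  have hA : (symbol_check exp = true) ↔
      ¬ ∃ i, i < exp.toList.length ∧ pvBadA exp.toList i = true := by
    rw [pv_A_all, List.all_eq_true]
    push Not
    constructor
    · intro h i hi; simpa using h i (List.mem_range.mpr hi)
    · intro h i hi; simpa using h i (List.mem_range.mp hi)
  rw [Bool.eq_iff_iff, hA, pv_alt_char]
  by_cases hnil : exp.toList = []
  · simp [hnil]
  · have hn0 : 0 < exp.toList.length := List.length_pos_iff.mpr hnil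
    simp only [hnil, false_or]
    constructor
    · intro h
      refine ⟨?_, ?_, ?_⟩
      · intro hs
        exact h (pv_main_bwd _ hn0 (Or.inl hs))
      · intro he
        exact h (pv_main_bwd _ hn0 (Or.inr (Or.inl he)))
      · intro i hi hp
        exact h (pv_main_bwd _ hn0 (Or.inr (Or.inr ⟨i, hi, hp⟩)))
    · rintro ⟨h1, h2, h3⟩ ⟨i, hi, hbad⟩
      rcases pv_main_fwd _ i hi hbad with hs | he | ⟨j, hj, hp⟩
      · exact h1 hs
      · exact h2 he
      · exact h3 j hj hp
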